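-- pv_equiv track=rewrite | github.com/teddyedo/adventofcode | Day 3/Gear ratios part 2.py | ottieni_numero_a_sinistra
-- ===== SOURCE A (Python) =====
-- def ottieni_numero_a_sinistra(posizione_asterisco, riga_corrente):
--     numero = ''
--
--     posizioneDiRicerca = posizione_asterisco - 1
--
--     if is_posizione_valida(posizioneDiRicerca, riga_corrente) and riga_corrente[posizione_asterisco - 1].isdigit():
--         pos = posizione_asterisco - 1
--         while is_posizione_valida(pos, riga_corrente) and riga_corrente[pos].isdigit():
--             numero += riga_corrente[pos]
--             pos -= 1
--         return int(numero[::-1])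
--
--     return None
--
-- def is_posizione_valida(posizione, riga_corrente):
--     return posizione >= 0 and posizione < len(riga_corrente)
-- ===== SOURCE B (Python) =====
-- def ottieni_numero_a_sinistra(posizione_asterisco, riga_corrente):
--     p = posizione_asterisco - 1
--     if not (0 <= p < len(riga_corrente)) or not riga_corrente[p].isdigit():
--         return None
--     # one forward pass over the prefix: 'inizio' ends as 1 + index of the
--     # last non-digit at or before p (0 if none), i.e. the start of the
--     # digit run containing p
--     inizio = 0
--     for i in range(p + 1):
--         if not riga_corrente[i].isdigit():
--             inizio = i + 1
--     return int(riga_corrente[inizio:p + 1])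
-- ===== Notes on version B (the rewrite author's own statement) =====
-- stated objective: alternative
-- what changed: A walks right-to-left from the asterisk collecting digit characters into a string and reverses it before int(); B instead makes one forward pass over the prefix to find the start of the digit run containing position-1 and converts a single slice, with no per-character accumulation or reversal.
import Mathlib
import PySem

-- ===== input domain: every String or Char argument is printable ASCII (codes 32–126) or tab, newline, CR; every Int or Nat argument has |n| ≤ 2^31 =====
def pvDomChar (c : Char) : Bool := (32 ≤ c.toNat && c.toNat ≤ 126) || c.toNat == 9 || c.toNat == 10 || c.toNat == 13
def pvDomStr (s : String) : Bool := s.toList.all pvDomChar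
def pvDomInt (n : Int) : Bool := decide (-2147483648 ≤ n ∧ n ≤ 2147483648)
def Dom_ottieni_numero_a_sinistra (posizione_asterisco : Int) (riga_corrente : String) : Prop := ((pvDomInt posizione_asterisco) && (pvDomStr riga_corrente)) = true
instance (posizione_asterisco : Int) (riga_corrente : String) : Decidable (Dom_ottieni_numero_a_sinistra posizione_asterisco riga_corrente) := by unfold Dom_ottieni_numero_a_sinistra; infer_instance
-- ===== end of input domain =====

-- B replaces A's right-to-left character accumulation + string reversal by one forward
-- pass over the prefix that finds the digit run's start, then a slice; objective: alternative.

-- ===== PORT A =====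
-- is_posizione_valida(posizione, riga_corrente)
def pvIsPosizioneValida (posizione : Int) (riga_corrente : List Char) : Bool :=
  posizione ≥ 0 && posizione < riga_corrente.length

-- the while loop: numero += riga_corrente[pos]; pos -= 1  (guard as in A)
def pvALoop (riga : List Char) (pos : Int) (numero : List Char) : List Char :=
  if h : (pvIsPosizioneValida pos riga && PySem.Chars.isdigit (PySem.List.pyGetD riga pos ' ')) = true then
    pvALoop riga (pos - 1) (numero ++ [PySem.List.pyGetD riga pos ' '])
  else numero
termination_by (pos + 1).toNat
decreasing_by
  simp only [pvIsPosizioneValida, Bool.and_eq_true, decide_eq_true_eq] at h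
  omega

def ottieni_numero_a_sinistra (posizione_asterisco : Int) (riga_corrente : String) : Option Int :=
  let riga := riga_corrente.toList
  let posizioneDiRicerca := posizione_asterisco - 1
  if (pvIsPosizioneValida posizioneDiRicerca riga &&
      PySem.Chars.isdigit (PySem.List.pyGetD riga (posizione_asterisco - 1) ' ')) = true then
    -- int(numero[::-1]); int() never raises here since numero holds only digits
    PySem.Int.ofChars? ((pvALoop riga (posizione_asterisco - 1) []).reverse)
  else none

-- ===== PORT B =====
-- the forward for-loop computing 'inizio'
def pvBStart (riga : List Char) (p : Nat) : Nat :=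
  (List.range (p + 1)).foldl
    (fun (inizio i : Nat) => if ¬ PySem.Chars.isdigit (PySem.List.pyGetD riga (i : Int) ' ') = true then i + 1 else inizio) 0

def ottieni_numero_a_sinistra_alt (posizione_asterisco : Int) (riga_corrente : String) : Option Int :=
  let riga := riga_corrente.toList
  let p := posizione_asterisco - 1
  if (0 ≤ p ∧ p < riga.length) ∧ PySem.Chars.isdigit (PySem.List.pyGetD riga p ' ') = true then
    let inizio := pvBStart riga p.toNat
    PySem.Int.ofChars? (PySem.List.slice riga (some (inizio : Int)) (some (p + 1)))
  else none

-- ===== PRECONDITION & SPEC =====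
def Spec_ottieni_numero_a_sinistra (posizione_asterisco : Int) (riga_corrente : String) (out : Option Int) : Prop := out = ottieni_numero_a_sinistra_alt posizione_asterisco riga_corrente
instance (posizione_asterisco : Int) (riga_corrente : String) (out : Option Int) : Decidable (Spec_ottieni_numero_a_sinistra posizione_asterisco riga_corrente out) := by unfold Spec_ottieni_numero_a_sinistra; infer_instance

-- ===== CLAIM (what is proved, stated in full; the proofs are below) =====
def Claim_equal_ottieni_numero_a_sinistra : Prop := ∀ (posizione_asterisco : Int) (riga_corrente : String), Dom_ottieni_numero_a_sinistra posizione_asterisco riga_corrente → Spec_ottieni_numero_a_sinistra posizione_asterisco riga_corrente (ottieni_numero_a_sinistra posizione_asterisco riga_corrente)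

-- ===== LEMMAS AND PROOFS =====

theorem pvBStart_zero (riga : List Char) :
    pvBStart riga 0 =
      if ¬ PySem.Chars.isdigit (PySem.List.pyGetD riga ((0 : Nat) : Int) ' ') = true then 1 else 0 := by
  simp [pvBStart, List.range_succ, PySem.List.pyGetD_zero, List.getD]

theorem pvBStart_succ (riga : List Char) (p : Nat) :
    pvBStart riga (p + 1) =
      if ¬ PySem.Chars.isdigit (PySem.List.pyGetD riga ((p + 1 : Nat) : Int) ' ') = true then p + 2
      else pvBStart riga p := by
  simp only [pvBStart, List.range_succ, List.foldl_append, List.foldl_cons, List.foldl_nil]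

theorem pvBStart_le (riga : List Char) (p : Nat) : pvBStart riga p ≤ p + 1 := by
  induction p with
  | zero => rw [pvBStart_zero]; split <;> omega
  | succ n ih => rw [pvBStart_succ]; split <;> omega

theorem pvGetD_eq (riga : List Char) (q : Nat) (hq : q < riga.length) :
    PySem.List.pyGetD riga (q : Int) ' ' = riga[q] := by
  simp [PySem.List.pyGetD_natCast, List.getD, List.getElem?_eq_getElem hq]

theorem drop_take_succ (l : List Char) (a k : Nat) (h : a + k < l.length) :
    (l.drop a).take (k + 1) = (l.drop a).take k ++ [l[a + k]] := by
  rw [List.take_add_one]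
  have : (l.drop a)[k]? = some l[a + k] := by
    rw [List.getElem?_drop, List.getElem?_eq_getElem h]
  simp [this]

theorem pvGuard_true (riga : List Char) (k : Nat) (hk : k < riga.length)
    (hd : PySem.Chars.isdigit (PySem.List.pyGetD riga (k : Int) ' ') = true) :
    (pvIsPosizioneValida (k : Int) riga &&
      PySem.Chars.isdigit (PySem.List.pyGetD riga (k : Int) ' ')) = true := by
  simp only [pvIsPosizioneValida, Bool.and_eq_true, decide_eq_true_eq, ge_iff_le]
  exact ⟨⟨Int.natCast_nonneg _, by exact_mod_cast hk⟩, hd⟩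

-- main invariant: at a digit position q the loop result is acc ++ (run slice).reverse
theorem pvALoop_eq (riga : List Char) (q : Nat) (hq : q < riga.length)
    (hd : PySem.Chars.isdigit (PySem.List.pyGetD riga (q : Int) ' ') = true) (acc : List Char) :
    pvALoop riga (q : Int) acc =
      acc ++ (PySem.List.slice riga (some (pvBStart riga q : Int)) (some ((q : Int) + 1))).reverse := by
  induction q generalizing acc with
  | zero =>
    rw [pvALoop, dif_pos (pvGuard_true riga 0 hq hd)]
    rw [pvALoop, dif_neg (by simp [pvIsPosizioneValida])]
    rw [pvBStart_zero, if_neg (by simpa using hd)]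
    have h1 : ((0 : Nat) : Int) + 1 = ((1 : Nat) : Int) := by norm_num
    rw [h1, PySem.List.slice_natCast]
    rw [pvGetD_eq riga 0 hq]
    have : List.take 1 riga = [riga[0]] := by
      cases riga with
      | nil => simp at hq
      | cons x xs => simp
    simp [this]
  | succ n ih =>
    rw [pvALoop, dif_pos (pvGuard_true riga (n+1) hq hd)]
    have hn : n < riga.length := by omega
    have hstep : ((n + 1 : Nat) : Int) - 1 = ((n : Nat) : Int) := by push_cast; ring
    rw [hstep]
    rw [pvBStart_succ, if_neg (by simpa using hd)]
    by_cases hdn : PySem.Chars.isdigit (PySem.List.pyGetD riga ((n : Nat) : Int) ' ') = true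
    · rw [ih hn hdn]
      have hle : pvBStart riga n ≤ n + 1 := pvBStart_le riga n
      have h2 : ((n : Nat) : Int) + 1 = ((n + 1 : Nat) : Int) := by push_cast; ring
      have h3 : ((n + 1 : Nat) : Int) + 1 = ((n + 2 : Nat) : Int) := by push_cast; ring
      rw [h2, h3, PySem.List.slice_natCast, PySem.List.slice_natCast]
      have e2 : n + 2 - pvBStart riga n = (n + 1 - pvBStart riga n) + 1 := by omega
      rw [e2, drop_take_succ riga (pvBStart riga n) (n + 1 - pvBStart riga n) (by omega)]
      have hidx : pvBStart riga n + (n + 1 - pvBStart riga n) = n + 1 := by omega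
      simp only [hidx]
      rw [pvGetD_eq riga (n + 1) hq]
      simp
    · rw [pvALoop, dif_neg (by
        rw [pvGetD_eq riga n hn] at hdn
        simp [pvIsPosizioneValida, List.getElem?_eq_getElem hn]
        exact fun _ => by simpa using hdn)]
      have hbn : pvBStart riga n = n + 1 := by
        cases n with
        | zero => rw [pvBStart_zero, if_pos (by simpa using hdn)]
        | succ m => rw [pvBStart_succ, if_pos (by simpa using hdn)]
      rw [hbn]
      have h3 : ((n + 1 : Nat) : Int) + 1 = ((n + 2 : Nat) : Int) := by push_cast; ring
      rw [h3, PySem.List.slice_natCast]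
      have e3 : n + 2 - (n + 1) = 1 := by omega
      rw [e3, drop_take_succ riga (n + 1) 0 (by omega)]
      rw [pvGetD_eq riga (n + 1) hq]
      simp

-- ===== VERDICT (by name: the statement is the Claim_ definition above) =====
theorem ottieni_numero_a_sinistra_spec : Claim_equal_ottieni_numero_a_sinistra := by
  intro pa s _
  unfold Spec_ottieni_numero_a_sinistra ottieni_numero_a_sinistra ottieni_numero_a_sinistra_alt
  set riga := s.toList with hr
  set p := pa - 1 with hp
  have hiff : (pvIsPosizioneValida p riga &&
      PySem.Chars.isdigit (PySem.List.pyGetD riga p ' ')) = true ↔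
      ((0 ≤ p ∧ p < (riga.length : Int)) ∧
        PySem.Chars.isdigit (PySem.List.pyGetD riga p ' ') = true) := by
    simp [pvIsPosizioneValida]
    try tauto
  by_cases hg : (0 ≤ p ∧ p < (riga.length : Int)) ∧
      PySem.Chars.isdigit (PySem.List.pyGetD riga p ' ') = true
  · rw [if_pos hg, if_pos (hiff.mpr hg)]
    obtain ⟨⟨h0, hlen⟩, hd⟩ := hg
    have hq : p = ((p.toNat : Nat) : Int) := by omega
    have hql : p.toNat < riga.length := by omega
    rw [hq] at hd
    rw [hq, pvALoop_eq riga p.toNat hql hd []]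
    simp
    rw [max_eq_left h0]
  · rw [if_neg hg, if_neg (fun hc => hg (hiff.mp hc))]
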